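-- pv_equiv track=rewrite | github.com/gudise/thesis | myfpga/interfaz_pcps.py | resize_array
-- ===== SOURCE A (Python) =====
-- def resize_array(array_old, array_size):
--     """Esta funcion toma un `array_old` de tamaño arbitrario y transfiere los elementos a un array de tamaño `array_size`, empezando por el dígito menos significativo (a la dcha.). Si `array_size` no es suficiente para contener todo el `array_old`, la salida estará truncada. Si `array_size` es excesivo para contener `array_old`, los huecos que sobren se rellenan con 0.
--
--     Parameters
--     ----------
--     array_old : lista
--         Array a redimensionar (tipo de datos arbitrario).
--     array_size : int
--         Tamaño del nuevo array.
--
--     Returns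
--     -------
--     lista
--         Lista del mismo tipo que `array_old` redimensionada.
--     """
--     split_string = [c for c in array_old]
--     result=[]
--     for i in range(array_size):
--         if i < len(split_string):
--             result.append(split_string[i])
--         else:
--             result.append(0)
--
--     return result
-- ===== SOURCE B (Python) =====
-- def resize_array(array_old, array_size):
--     elems = list(array_old)
--     n = max(0, array_size)
--     return elems[:n] + [0] * max(0, array_size - len(elems))
-- ===== Notes on version B (the rewrite author's own statement) =====
-- stated objective: simpler
-- what changed: Replaces the per-index branching append loop with two bulk operations: a truncating slice elems[:max(0,size)] plus a multiplicative zero-pad block.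
import Mathlib
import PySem

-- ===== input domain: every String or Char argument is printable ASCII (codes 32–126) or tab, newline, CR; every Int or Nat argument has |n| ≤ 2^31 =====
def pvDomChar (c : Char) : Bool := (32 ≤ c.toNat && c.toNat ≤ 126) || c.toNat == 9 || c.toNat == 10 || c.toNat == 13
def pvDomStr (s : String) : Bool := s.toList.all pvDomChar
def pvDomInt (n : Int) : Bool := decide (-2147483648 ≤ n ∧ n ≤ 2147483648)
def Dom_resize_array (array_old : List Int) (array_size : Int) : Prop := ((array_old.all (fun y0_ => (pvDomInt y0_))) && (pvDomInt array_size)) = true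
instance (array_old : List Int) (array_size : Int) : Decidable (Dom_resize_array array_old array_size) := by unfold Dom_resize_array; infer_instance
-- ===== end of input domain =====

-- B replaces A's per-index branching loop with two bulk operations (truncating slice + zero-pad block); same result, proved equal.


-- ===== PORT A =====
-- literal port: copy the list, then for i in range(array_size) append element or 0
def resize_array (array_old : List Int) (array_size : Int) : List Int :=
  let split_string := array_old.map (fun c => c)
  (PySem.List.pyRange 0 array_size 1).foldl
    (fun result i =>
      if i < (split_string.length : Int) then
        result ++ [PySem.List.pyGetD split_string i 0]
      else
        result ++ [0])
    []

-- ===== PORT B =====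
-- literal port of Source B: elems[:max(0,size)] + [0]*max(0, size - len(elems))
def resize_array_alt (array_old : List Int) (array_size : Int) : List Int :=
  let elems := array_old
  let n := max 0 array_size
  elems.take n.toNat ++ List.replicate (max 0 (array_size - (elems.length : Int))).toNat 0

-- ===== PRECONDITION & SPEC =====
def Spec_resize_array (array_old : List Int) (array_size : Int) (out : List Int) : Prop := out = resize_array_alt array_old array_size
instance (array_old : List Int) (array_size : Int) (out : List Int) : Decidable (Spec_resize_array array_old array_size out) := by unfold Spec_resize_array; infer_instance

-- ===== CLAIM (what is proved, stated in full; the proofs are below) =====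
def Claim_equal_resize_array : Prop := ∀ (array_old : List Int) (array_size : Int), Dom_resize_array array_old array_size → Spec_resize_array array_old array_size (resize_array array_old array_size)

-- ===== LEMMAS AND PROOFS =====

-- A's loop over range(0, s) computes take-then-pad, for a natural bound s
theorem resize_loop_eq (xs : List Int) (s : Nat) :
    (PySem.List.pyRange 0 (s : Int) 1).foldl
      (fun result i =>
        if i < (xs.length : Int) then
          result ++ [PySem.List.pyGetD xs i 0]
        else
          result ++ [0])
      []
    = xs.take s ++ List.replicate (s - xs.length) 0 := by
  induction s with
  | zero => simp
  | succ s ih =>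
      have h : ((s : Int) + 1) = ((s + 1 : Nat) : Int) := by push_cast; ring
      rw [← h, PySem.List.pyRange_one_succ_right ((by exact_mod_cast Nat.zero_le s : (0:Int) ≤ (s:Int))), List.foldl_append, ih]
      simp only [List.foldl_cons, List.foldl_nil]
      by_cases hs : s < xs.length
      · have hlt : (s : Int) < (xs.length : Int) := by exact_mod_cast hs
        rw [if_pos hlt]
        have hget : PySem.List.pyGetD xs (s : Int) 0 = xs[s] := by
          rw [PySem.List.pyGetD_eq_getElem xs 0 (by exact_mod_cast Nat.zero_le s) hlt]
          simp
        rw [hget]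
        have h1 : s + 1 - xs.length = 0 := by omega
        have h2 : s - xs.length = 0 := by omega
        rw [h1, h2, List.take_add_one]
        simp [List.getElem?_eq_getElem hs]
      · have hge : ¬ ((s : Int) < (xs.length : Int)) := by
          simpa using Nat.not_lt.mp hs
        rw [if_neg hge]
        have h1 : s + 1 - xs.length = (s - xs.length) + 1 := by omega
        have h2 : xs.take (s + 1) = xs.take s := by
          rw [List.take_of_length_le (by omega), List.take_of_length_le (by omega)]
        rw [h1, h2, List.replicate_succ']
        simp [List.append_assoc]

-- ===== VERDICT (by name: the statement is the Claim_ definition above) =====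
theorem resize_array_spec : Claim_equal_resize_array := by
  intro xs size _
  show resize_array xs size = resize_array_alt xs size
  unfold resize_array resize_array_alt
  simp only [List.map_id']
  by_cases h : 0 ≤ size
  · obtain ⟨s, rfl⟩ := Int.eq_ofNat_of_zero_le h
    rw [resize_loop_eq]
    have h1 : (max 0 (s : Int)).toNat = s := by omega
    have h2 : (max 0 ((s : Int) - (xs.length : Int))).toNat = s - xs.length := by omega
    rw [h1, h2]
  · have hneg : size < 0 := by omega
    rw [PySem.List.pyRange_one_eq_nil (by omega)]
    have h1 : (max 0 size).toNat = 0 := by omega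
    have h2 : (max 0 (size - (xs.length : Int))).toNat = 0 := by omega
    rw [h1, h2]
    simp
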